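-- pv_equiv track=rewrite | github.com/DCrescimone1/scraping_master | BMEcat_transformer/core/comparison_table_builder.py | _align_features
-- ===== SOURCE A (Python) =====
-- from typing import Dict, List, Any, Tuple, Set
--
-- def _align_features(
--
--     original_list: List[Dict[str, Any]],
--     dabag_list: List[Dict[str, Any]],
--     web_specs: Dict[str, str],
--     ai_list: List[Dict[str, Any]],
-- ) -> List[Dict[str, Any]]:
--     """Align features across sources by simple exact-name matching.
--
--     Strategy:
--     - Use union of all feature names across sources as the index set.
--     - For web specs (dict label->value), use labels as names.
--     - Construct rows with 8 columns (plus funit for original/dabag), AI left blank.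
--     """
--     # Collect all feature names
--     names: Set[str] = set()
--     names.update([f.get("fname", "") for f in original_list if f.get("fname")])
--     names.update([f.get("fname", "") for f in dabag_list if f.get("fname")])
--     names.update([k for k in web_specs.keys() if k])
--     names.update([f.get("fname", "") for f in ai_list if f.get("fname")])
--
--     # Build quick lookups
--     orig_map = {f.get("fname", ""): f for f in original_list if f.get("fname")}
--     dabag_map = {f.get("fname", ""): f for f in dabag_list if f.get("fname")}
--     ai_map = {f.get("fname", ""): f for f in ai_list if f.get("fname")}
--
--     rows: List[Dict[str, Any]] = []
--     for name in sorted(names):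
--         o = orig_map.get(name, {})
--         d = dabag_map.get(name, {})
--         w_val = web_specs.get(name, "")
--         a = ai_map.get(name, {})
--         rows.append({
--             "original_fname": name if o else "",
--             "original_fvalue": o.get("fvalue", ""),
--             "original_funit": o.get("funit"),
--             "dabag_fname": name if d else "",
--             "dabag_fvalue": d.get("fvalue", ""),
--             "dabag_funit": d.get("funit"),
--             "web_fname": name if w_val else "",
--             "web_fvalue": w_val,
--             "ai_fname": name if a else "",
--             "ai_fvalue": a.get("fvalue", "") if a else "",
--         })
--     return rows
-- ===== SOURCE B (Python) =====
-- def _align_features(original_list, dabag_list, web_specs, ai_list):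
--     """Single merged rows dict keyed by feature name: one pass per source
--     creates-or-updates the row, setting only that source's columns; then emit
--     rows in sorted-name order."""
--     rows = {}
--
--     def row_for(name):
--         return rows.setdefault(name, {
--             "original_fname": "", "original_fvalue": "", "original_funit": None,
--             "dabag_fname": "", "dabag_fvalue": "", "dabag_funit": None,
--             "web_fname": "", "web_fvalue": "",
--             "ai_fname": "", "ai_fvalue": "",
--         })
--
--     for f in original_list:
--         name = f.get("fname")
--         if name:
--             r = row_for(name)
--             r["original_fname"] = name
--             r["original_fvalue"] = f.get("fvalue", "")
--             r["original_funit"] = f.get("funit")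
--     for f in dabag_list:
--         name = f.get("fname")
--         if name:
--             r = row_for(name)
--             r["dabag_fname"] = name
--             r["dabag_fvalue"] = f.get("fvalue", "")
--             r["dabag_funit"] = f.get("funit")
--     for name, val in web_specs.items():
--         if name:
--             r = row_for(name)
--             r["web_fname"] = name if val else ""
--             r["web_fvalue"] = val
--     for f in ai_list:
--         name = f.get("fname")
--         if name:
--             r = row_for(name)
--             r["ai_fname"] = name
--             r["ai_fvalue"] = f.get("fvalue", "")
--     return [rows[name] for name in sorted(rows)]
-- ===== Notes on version B (the rewrite author's own statement) =====
-- stated objective: alternative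
-- what changed: B replaces A's name-set union plus three per-source lookup maps by one merged rows dict keyed by feature name, built by a create-or-update pass over each source that sets only that source's columns, then emitted in sorted-name order.
import Mathlib
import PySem

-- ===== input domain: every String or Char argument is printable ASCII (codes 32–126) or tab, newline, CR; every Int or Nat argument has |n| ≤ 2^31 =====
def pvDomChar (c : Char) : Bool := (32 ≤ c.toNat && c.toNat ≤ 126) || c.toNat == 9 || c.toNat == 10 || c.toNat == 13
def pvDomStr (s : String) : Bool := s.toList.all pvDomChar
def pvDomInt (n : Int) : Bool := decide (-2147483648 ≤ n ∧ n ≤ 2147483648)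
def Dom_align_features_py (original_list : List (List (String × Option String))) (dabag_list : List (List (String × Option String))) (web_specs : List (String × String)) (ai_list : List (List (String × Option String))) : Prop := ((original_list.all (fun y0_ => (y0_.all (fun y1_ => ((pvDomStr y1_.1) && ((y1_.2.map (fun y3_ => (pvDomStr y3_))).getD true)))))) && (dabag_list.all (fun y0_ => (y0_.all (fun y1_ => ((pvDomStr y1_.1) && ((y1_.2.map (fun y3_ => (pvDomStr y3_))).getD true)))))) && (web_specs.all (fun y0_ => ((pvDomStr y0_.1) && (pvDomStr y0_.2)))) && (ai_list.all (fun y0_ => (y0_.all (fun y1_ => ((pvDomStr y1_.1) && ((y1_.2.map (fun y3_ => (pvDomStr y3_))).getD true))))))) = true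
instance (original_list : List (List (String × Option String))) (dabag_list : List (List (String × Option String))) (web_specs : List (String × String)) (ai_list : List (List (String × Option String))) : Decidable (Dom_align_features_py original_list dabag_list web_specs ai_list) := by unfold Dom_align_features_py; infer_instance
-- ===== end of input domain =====

-- ===== PORT A =====
-- B merges all sources into one rows dict instead of A's name-set union + three lookup maps (objective: alternative; same cost).
-- f.get(k) on a dict given as an association list: first match (the convention's dict lookup).
def pvFGet (f : List (String × Option String)) (k : String) : Option (Option String) :=
  (PySem.Dict.mk f).get? k

-- f.get(k, dflt)
def pvFGetD (f : List (String × Option String)) (k : String) (dflt : Option String) : Option String :=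
  (pvFGet f k).getD dflt

-- the comprehension guard `if f.get("fname")` together with the value `f.get("fname", "")`:
-- `some s` exactly when f.get("fname") is a truthy (non-empty) string s
def pvName? (f : List (String × Option String)) : Option String :=
  match pvFGet f "fname" with
  | some (some s) => if s = "" then none else some s
  | _ => none

def align_features_py (original_list : List (List (String × Option String))) (dabag_list : List (List (String × Option String))) (web_specs : List (String × String)) (ai_list : List (List (String × Option String))) : List (List (String × Option String)) :=
  let names1 : PySem.Set String := PySem.Set.update PySem.Set.empty (original_list.filterMap pvName?)
  let names2 : PySem.Set String := PySem.Set.update names1 (dabag_list.filterMap pvName?)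
  let names3 : PySem.Set String := PySem.Set.update names2 (((PySem.Dict.mk web_specs).keys).filter (fun k => k ≠ ""))
  let names  : PySem.Set String := PySem.Set.update names3 (ai_list.filterMap pvName?)
  let origMap : PySem.Dict String (List (String × Option String)) :=
    original_list.foldl (fun m f => match pvName? f with | some s => m.insert s f | none => m) PySem.Dict.empty
  let dabagMap : PySem.Dict String (List (String × Option String)) :=
    dabag_list.foldl (fun m f => match pvName? f with | some s => m.insert s f | none => m) PySem.Dict.empty
  let aiMap : PySem.Dict String (List (String × Option String)) :=
    ai_list.foldl (fun m f => match pvName? f with | some s => m.insert s f | none => m) PySem.Dict.empty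
  (PySem.List.sorted names (fun x => x) false).map (fun name =>
    let o := origMap.getD name []
    let d := dabagMap.getD name []
    let wVal := (PySem.Dict.mk web_specs).getD name ""
    let a := aiMap.getD name []
    [("original_fname", some (if o ≠ [] then name else "")),
     ("original_fvalue", pvFGetD o "fvalue" (some "")),
     ("original_funit", pvFGetD o "funit" none),
     ("dabag_fname", some (if d ≠ [] then name else "")),
     ("dabag_fvalue", pvFGetD d "fvalue" (some "")),
     ("dabag_funit", pvFGetD d "funit" none),
     ("web_fname", some (if wVal ≠ "" then name else "")),
     ("web_fvalue", some wVal),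
     ("ai_fname", some (if a ≠ [] then name else "")),
     ("ai_fvalue", if a ≠ [] then pvFGetD a "fvalue" (some "") else some "")])

-- ===== PORT B =====
def pvDefaultRow : PySem.Dict String (Option String) := PySem.Dict.mk
  [("original_fname", some ""), ("original_fvalue", some ""), ("original_funit", none),
   ("dabag_fname", some ""), ("dabag_fvalue", some ""), ("dabag_funit", none),
   ("web_fname", some ""), ("web_fvalue", some ""),
   ("ai_fname", some ""), ("ai_fvalue", some "")]

-- one of Source B's source loops: for each element with a truthy name (g), setdefault the
-- default row and overwrite that source's columns (u) in place
def pvPass {α : Type} (g : α → Option String) (u : α → String → PySem.Dict String (Option String) → PySem.Dict String (Option String))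
    (rows : PySem.Dict String (PySem.Dict String (Option String))) (l : List α) : PySem.Dict String (PySem.Dict String (Option String)) :=
  l.foldl (fun rows x =>
    match g x with
    | none => rows
    | some name => rows.insert name (u x name (rows.getD name pvDefaultRow))) rows

def pvUOrig (f : List (String × Option String)) (name : String) (r : PySem.Dict String (Option String)) : PySem.Dict String (Option String) :=
  ((r.insert "original_fname" (some name)).insert "original_fvalue" (pvFGetD f "fvalue" (some ""))).insert "original_funit" (pvFGetD f "funit" none)

def pvUDabag (f : List (String × Option String)) (name : String) (r : PySem.Dict String (Option String)) : PySem.Dict String (Option String) :=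
  ((r.insert "dabag_fname" (some name)).insert "dabag_fvalue" (pvFGetD f "fvalue" (some ""))).insert "dabag_funit" (pvFGetD f "funit" none)

-- for name, val in web_specs.items(): if name: ...
def pvGWeb (kv : String × String) : Option String :=
  if kv.1 = "" then none else some kv.1

def pvUWeb (kv : String × String) (name : String) (r : PySem.Dict String (Option String)) : PySem.Dict String (Option String) :=
  (r.insert "web_fname" (some (if kv.2 ≠ "" then name else ""))).insert "web_fvalue" (some kv.2)

def pvUAi (f : List (String × Option String)) (name : String) (r : PySem.Dict String (Option String)) : PySem.Dict String (Option String) :=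
  (r.insert "ai_fname" (some name)).insert "ai_fvalue" (pvFGetD f "fvalue" (some ""))

def pvRows (original_list : List (List (String × Option String))) (dabag_list : List (List (String × Option String))) (web_specs : List (String × String)) (ai_list : List (List (String × Option String))) : PySem.Dict String (PySem.Dict String (Option String)) :=
  pvPass pvName? pvUAi
    (pvPass pvGWeb pvUWeb
      (pvPass pvName? pvUDabag
        (pvPass pvName? pvUOrig PySem.Dict.empty original_list)
        dabag_list)
      web_specs)
    ai_list

def align_features_py_alt (original_list : List (List (String × Option String))) (dabag_list : List (List (String × Option String))) (web_specs : List (String × String)) (ai_list : List (List (String × Option String))) : List (List (String × Option String)) :=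
  let rows := pvRows original_list dabag_list web_specs ai_list
  (PySem.List.sorted rows.keys (fun x => x) false).map (fun name => (rows.getD name pvDefaultRow).items)

-- ===== PRECONDITION & SPEC =====
-- Pre_ excludes web_specs association lists with duplicate keys: they encode no Python dict (dict
-- construction collapses them last-wins, so both Pythons agree), and on the raw pair lists A's
-- first-match convention lookup and B's in-order iteration are artefacts of the encoding.
def Pre_align_features_py (original_list : List (List (String × Option String))) (dabag_list : List (List (String × Option String))) (web_specs : List (String × String)) (ai_list : List (List (String × Option String))) : Prop :=
  (web_specs.map Prod.fst).Nodup
instance (original_list : List (List (String × Option String))) (dabag_list : List (List (String × Option String))) (web_specs : List (String × String)) (ai_list : List (List (String × Option String))) : Decidable (Pre_align_features_py original_list dabag_list web_specs ai_list) := by unfold Pre_align_features_py; infer_instance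

def pvWitness_align_features_py : (List (List (String × Option String))) × (List (List (String × Option String))) × (List (String × String)) × (List (List (String × Option String))) :=
  ([[("fname", some "a"), ("fvalue", some "1")]], [], [("b", "v")], [[("fname", some "a")]])

def Spec_align_features_py (original_list : List (List (String × Option String))) (dabag_list : List (List (String × Option String))) (web_specs : List (String × String)) (ai_list : List (List (String × Option String))) (out : List (List (String × Option String))) : Prop := out = align_features_py_alt original_list dabag_list web_specs ai_list
instance (original_list : List (List (String × Option String))) (dabag_list : List (List (String × Option String))) (web_specs : List (String × String)) (ai_list : List (List (String × Option String))) (out : List (List (String × Option String))) : Decidable (Spec_align_features_py original_list dabag_list web_specs ai_list out) := by unfold Spec_align_features_py; infer_instance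

-- ===== CLAIM (what is proved, stated in full; the proofs are below) =====
def Claim_equal_align_features_py : Prop := ∀ (original_list : List (List (String × Option String))) (dabag_list : List (List (String × Option String))) (web_specs : List (String × String)) (ai_list : List (List (String × Option String))), Dom_align_features_py original_list dabag_list web_specs ai_list → Pre_align_features_py original_list dabag_list web_specs ai_list → Spec_align_features_py original_list dabag_list web_specs ai_list (align_features_py original_list dabag_list web_specs ai_list)

-- ===== LEMMAS AND PROOFS =====

-- last element of l whose guard evaluates to `some n` (the occurrence whose update survives)
def pvLast? {α : Type} (g : α → Option String) (n : String) : List α → Option α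
  | [] => none
  | x :: t =>
    match pvLast? g n t with
    | some y => some y
    | none => if g x = some n then some x else none

lemma pvLast?_sound {α : Type} (g : α → Option String) (n : String) :
    ∀ (l : List α) (x : α), pvLast? g n l = some x → g x = some n := by
  intro l
  induction l with
  | nil => intro x h; simp [pvLast?] at h
  | cons a t ih =>
    intro x h
    unfold pvLast? at h
    cases ht : pvLast? g n t with
    | some y =>
      rw [ht] at h
      simp only [Option.some.injEq] at h
      exact h ▸ ih y ht
    | none =>
      rw [ht] at h
      by_cases hg : g a = some n
      · simp only [hg, if_pos] at h
        simp only [Option.some.injEq] at h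
        exact h ▸ hg
      · simp [hg] at h

lemma pvLast?_mem {α : Type} (g : α → Option String) (n : String) :
    ∀ (l : List α) (x : α), pvLast? g n l = some x → x ∈ l := by
  intro l
  induction l with
  | nil => intro x h; simp [pvLast?] at h
  | cons a t ih =>
    intro x h
    unfold pvLast? at h
    cases ht : pvLast? g n t with
    | some y =>
      rw [ht] at h
      simp only [Option.some.injEq] at h
      exact h ▸ List.mem_cons_of_mem a (ih y ht)
    | none =>
      rw [ht] at h
      by_cases hg : g a = some n
      · simp only [hg, if_pos] at h
        simp only [Option.some.injEq] at h
        exact h ▸ List.mem_cons_self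
      · simp [hg] at h

lemma pvName?_some {f : List (String × Option String)} {s : String}
    (h : pvName? f = some s) : s ≠ "" ∧ f ≠ [] := by
  constructor
  · unfold pvName? at h
    cases hg : pvFGet f "fname" with
    | none => rw [hg] at h; simp at h
    | some ov =>
      rw [hg] at h
      cases ov with
      | none => simp at h
      | some s' =>
        by_cases hs : s' = ""
        · simp [hs] at h
        · simp only [if_neg hs, Option.some.injEq] at h
          exact h ▸ hs
  · rintro rfl
    rw [show pvName? ([] : List (String × Option String)) = none from rfl] at h
    cases h

-- unfolding equations for pvPass
lemma pvPass_cons {α : Type} (g : α → Option String)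
    (u : α → String → PySem.Dict String (Option String) → PySem.Dict String (Option String))
    (rows : PySem.Dict String (PySem.Dict String (Option String))) (a : α) (l : List α) :
    pvPass g u rows (a :: l) =
      pvPass g u (match g a with
        | none => rows
        | some name => rows.insert name (u a name (rows.getD name pvDefaultRow))) l := rfl

-- keys of a pass: the source's truthy names get unioned in
lemma pvKeysPass {α : Type} (g : α → Option String)
    (u : α → String → PySem.Dict String (Option String) → PySem.Dict String (Option String)) :
    ∀ (l : List α) (rows : PySem.Dict String (PySem.Dict String (Option String))),
      (pvPass g u rows l).keys = PySem.Set.update rows.keys (l.filterMap g) := by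
  intro l
  induction l with
  | nil => intro rows; rfl
  | cons a t ih =>
    intro rows
    rw [pvPass_cons]
    cases hg : g a with
    | none =>
      simp only [hg]
      rw [ih, List.filterMap_cons, hg]
    | some s =>
      simp only [hg]
      rw [ih, List.filterMap_cons, hg, PySem.Set.update_cons]
      congr 1
      rw [PySem.Set.add_eq_ite]
      cases hc : rows.contains s with
      | true =>
        rw [PySem.Dict.keys_insert_of_contains _ _ hc,
            if_pos ((PySem.Dict.contains_iff_mem_keys rows s).mp hc)]
      | false =>
        rw [PySem.Dict.keys_insert_of_not_contains _ _ hc,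
            if_neg (fun hm => by rw [(PySem.Dict.contains_iff_mem_keys rows s).mpr hm] at hc; cases hc)]

-- a pass leaves a column it does not set unchanged (also on rows it creates: defaults agree)
lemma pvPassUntouched {α : Type} (g : α → Option String)
    (u : α → String → PySem.Dict String (Option String) → PySem.Dict String (Option String))
    (k : String) (hu : ∀ x n r, (u x n r).get? k = r.get? k) :
    ∀ (l : List α) (rows : PySem.Dict String (PySem.Dict String (Option String))) (n : String),
      ((pvPass g u rows l).getD n pvDefaultRow).get? k = (rows.getD n pvDefaultRow).get? k := by
  intro l
  induction l with
  | nil => intro rows n; rfl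
  | cons a t ih =>
    intro rows n
    rw [pvPass_cons]
    cases hg : g a with
    | none => simp only [hg]; rw [ih]
    | some s =>
      simp only [hg]
      rw [ih, PySem.Dict.getD_insert]
      by_cases hs : n = s
      · subst hs; rw [if_pos rfl, hu]
      · rw [if_neg hs]

-- the surviving value of a column the pass does set is that of the last truthy occurrence
lemma pvPassTouched {α : Type} (g : α → Option String)
    (u : α → String → PySem.Dict String (Option String) → PySem.Dict String (Option String))
    (k : String) (w : α → String → Option String)
    (hu : ∀ x n r, (u x n r).get? k = some (w x n)) :
    ∀ (l : List α) (rows : PySem.Dict String (PySem.Dict String (Option String))) (n : String),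
      ((pvPass g u rows l).getD n pvDefaultRow).get? k
        = match pvLast? g n l with
          | some x => some (w x n)
          | none => (rows.getD n pvDefaultRow).get? k := by
  intro l
  induction l with
  | nil => intro rows n; rfl
  | cons a t ih =>
    intro rows n
    rw [pvPass_cons]
    cases ht : pvLast? g n t with
    | some y =>
      cases hg : g a with
      | none => simp only [hg]; rw [ih, ht]; simp [pvLast?, ht]
      | some _ => simp only [hg]; rw [ih, ht]; simp [pvLast?, ht]
    | none =>
      cases hg : g a with
      | none =>
        simp only [hg]
        rw [ih, ht]
        simp [pvLast?, ht, hg]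
      | some s =>
        simp only [hg]
        rw [ih, ht]
        simp only [pvLast?, ht]
        by_cases hs : s = n
        · subst hs
          rw [PySem.Dict.getD_insert, if_pos rfl, hu]
          simp [hg]
        · rw [PySem.Dict.getD_insert, if_neg (fun h => hs h.symm)]
          rw [hg]
          simp [hs]

-- first-match lookup in an assoc list with distinct keys = last-match (B's iteration order)
lemma pvMkGet_eq_last (l : List (String × String)) (n : String) (hn : n ≠ "")
    (hw : (l.map Prod.fst).Nodup) :
    (PySem.Dict.mk l).get? n = (pvLast? pvGWeb n l).map Prod.snd := by
  induction l with
  | nil => rfl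
  | cons kv t ih =>
    simp only [List.map_cons, List.nodup_cons] at hw
    rw [show PySem.Dict.mk (kv :: t) = PySem.Dict.mk ((kv.1, kv.2) :: t) from rfl,
        PySem.Dict.get?_mk_cons]
    unfold pvLast?
    cases ht : pvLast? pvGWeb n t with
    | some y =>
      have hy : pvGWeb y = some n := pvLast?_sound _ _ _ _ ht
      have hy1 : y.1 = n := by
        unfold pvGWeb at hy
        by_cases h1 : y.1 = ""
        · simp [h1] at hy
        · simpa [h1] using hy
      have hmem : n ∈ t.map Prod.fst := by
        rw [← hy1]; exact List.mem_map_of_mem (pvLast?_mem _ _ _ _ ht)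
      rw [if_neg (by simp only [beq_iff_eq]; intro hh; rw [hh] at hw; exact hw.1 hmem)]
      rw [ih hw.2, ht]
    | none =>
      by_cases hk : kv.1 = n
      · rw [if_pos (by simp [hk])]
        rw [show pvGWeb kv = some n from by unfold pvGWeb; rw [if_neg (hk ▸ hn), hk]]
        simp
      · rw [if_neg (by simp [hk])]
        rw [ih hw.2]
        have : pvGWeb kv ≠ some n := by
          unfold pvGWeb
          by_cases h1 : kv.1 = "" <;> simp [h1, hk]
        rw [if_neg this, ht]

lemma pvKeysInsertMem (r : PySem.Dict String (Option String)) (k : String) (v : Option String)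
    (hk : r.keys = pvDefaultRow.keys) (hm : k ∈ pvDefaultRow.keys) :
    (r.insert k v).keys = pvDefaultRow.keys := by
  rw [PySem.Dict.keys_insert_of_contains _ v
        ((PySem.Dict.contains_iff_mem_keys r k).mpr (hk ▸ hm)), hk]

lemma pvUOrigKeys : ∀ (f : List (String × Option String)) (n : String)
    (r : PySem.Dict String (Option String)), r.keys = pvDefaultRow.keys →
    (pvUOrig f n r).keys = pvDefaultRow.keys := by
  intro f n r hk
  exact pvKeysInsertMem _ _ _ (pvKeysInsertMem _ _ _ (pvKeysInsertMem _ _ _ hk (by decide)) (by decide)) (by decide)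

lemma pvUDabagKeys : ∀ (f : List (String × Option String)) (n : String)
    (r : PySem.Dict String (Option String)), r.keys = pvDefaultRow.keys →
    (pvUDabag f n r).keys = pvDefaultRow.keys := by
  intro f n r hk
  exact pvKeysInsertMem _ _ _ (pvKeysInsertMem _ _ _ (pvKeysInsertMem _ _ _ hk (by decide)) (by decide)) (by decide)

lemma pvUWebKeys : ∀ (kv : String × String) (n : String)
    (r : PySem.Dict String (Option String)), r.keys = pvDefaultRow.keys →
    (pvUWeb kv n r).keys = pvDefaultRow.keys := by
  intro kv n r hk
  exact pvKeysInsertMem _ _ _ (pvKeysInsertMem _ _ _ hk (by decide)) (by decide)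

lemma pvUAiKeys : ∀ (f : List (String × Option String)) (n : String)
    (r : PySem.Dict String (Option String)), r.keys = pvDefaultRow.keys →
    (pvUAi f n r).keys = pvDefaultRow.keys := by
  intro f n r hk
  exact pvKeysInsertMem _ _ _ (pvKeysInsertMem _ _ _ hk (by decide)) (by decide)

lemma pvPassKeysInv {α : Type} (g : α → Option String)
    (u : α → String → PySem.Dict String (Option String) → PySem.Dict String (Option String))
    (hu : ∀ x n r, r.keys = pvDefaultRow.keys → (u x n r).keys = pvDefaultRow.keys) :
    ∀ (l : List α) (rows : PySem.Dict String (PySem.Dict String (Option String))),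
      (∀ n r, rows.get? n = some r → r.keys = pvDefaultRow.keys) →
      ∀ n r, (pvPass g u rows l).get? n = some r → r.keys = pvDefaultRow.keys := by
  intro l
  induction l with
  | nil => intro rows h; exact h
  | cons a t ih =>
    intro rows h
    rw [pvPass_cons]
    cases hg : g a with
    | none => simp only [hg]; exact ih rows h
    | some s =>
      simp only [hg]
      apply ih
      intro n r hr
      rw [PySem.Dict.get?_insert] at hr
      by_cases hs : n = s
      · rw [if_pos hs] at hr
        cases hr
        apply hu
        cases hgs : rows.get? s with
        | none => rw [PySem.Dict.getD_of_get?_eq_none _ _ hgs]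
        | some r' => rw [PySem.Dict.getD_of_get?_eq_some _ _ hgs]; exact h s r' hgs
      · rw [if_neg hs] at hr
        exact h n r hr

lemma pvRowsKeys (ol dl : List (List (String × Option String))) (ws : List (String × String))
    (al : List (List (String × Option String))) (n : String) :
    ((pvRows ol dl ws al).getD n pvDefaultRow).keys = pvDefaultRow.keys := by
  have h0 : ∀ (n : String) (r : PySem.Dict String (Option String)),
      (PySem.Dict.empty : PySem.Dict String (PySem.Dict String (Option String))).get? n = some r →
      r.keys = pvDefaultRow.keys := by
    intro n r h; rw [PySem.Dict.get?_empty] at h; cases h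
  have h4 := pvPassKeysInv pvName? pvUAi pvUAiKeys al _
    (pvPassKeysInv pvGWeb pvUWeb pvUWebKeys ws _
      (pvPassKeysInv pvName? pvUDabag pvUDabagKeys dl _
        (pvPassKeysInv pvName? pvUOrig pvUOrigKeys ol _ h0)))
  cases h : (pvRows ol dl ws al).get? n with
  | none => rw [PySem.Dict.getD_of_get?_eq_none _ _ h]
  | some r => rw [PySem.Dict.getD_of_get?_eq_some _ _ h]; exact h4 n r h

-- A's lookup maps: last truthy occurrence wins
lemma pvGetA' : ∀ (l : List (List (String × Option String)))
    (m : PySem.Dict String (List (String × Option String))) (n : String),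
    (l.foldl (fun m f => match pvName? f with | some s => m.insert s f | none => m) m).get? n
      = match pvLast? pvName? n l with
        | some f => some f
        | none => m.get? n := by
  intro l
  induction l with
  | nil => intro m n; rfl
  | cons a t ih =>
    intro m n
    rw [List.foldl_cons, ih]
    cases ht : pvLast? pvName? n t with
    | some y => simp [pvLast?, ht]
    | none =>
      simp only [pvLast?, ht]
      cases hg : pvName? a with
      | none => simp [hg]
      | some s =>
        simp only [hg]
        by_cases hs : s = n
        · subst hs; rw [PySem.Dict.get?_insert, if_pos rfl]; simp
        · rw [PySem.Dict.get?_insert, if_neg (fun h => hs h.symm)]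
          simp [hs]

-- the name set A unions and B's rows keys are the same list
lemma pvWebFilter : ∀ (ws : List (String × String)),
    ws.filterMap pvGWeb = ((PySem.Dict.mk ws).keys).filter (fun k => k ≠ "") := by
  intro ws
  rw [PySem.Dict.keys_mk]
  induction ws with
  | nil => rfl
  | cons kv t ih =>
    rw [List.filterMap_cons, List.map_cons, List.filter_cons]
    by_cases h1 : kv.1 = ""
    · rw [show pvGWeb kv = none from by unfold pvGWeb; rw [if_pos h1]]
      simp [h1, ih]
    · rw [show pvGWeb kv = some kv.1 from by unfold pvGWeb; rw [if_neg h1]]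
      simp [h1, ih]

lemma pvNamesEq (ol dl : List (List (String × Option String))) (ws : List (String × String))
    (al : List (List (String × Option String))) :
    (pvRows ol dl ws al).keys
      = PySem.Set.update (PySem.Set.update (PySem.Set.update (PySem.Set.update PySem.Set.empty
          (ol.filterMap pvName?)) (dl.filterMap pvName?))
          (((PySem.Dict.mk ws).keys).filter (fun k => k ≠ ""))) (al.filterMap pvName?) := by
  rw [pvRows, pvKeysPass, pvKeysPass, pvKeysPass, pvKeysPass, PySem.Dict.keys_empty, pvWebFilter]
  rfl

lemma pvNamesNe (ol dl : List (List (String × Option String))) (ws : List (String × String))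
    (al : List (List (String × Option String))) (n : String)
    (h : n ∈ PySem.Set.update (PySem.Set.update (PySem.Set.update (PySem.Set.update PySem.Set.empty
          (ol.filterMap pvName?)) (dl.filterMap pvName?))
          (((PySem.Dict.mk ws).keys).filter (fun k => k ≠ ""))) (al.filterMap pvName?)) :
    n ≠ "" := by
  simp only [PySem.Set.mem_update, List.mem_filterMap, List.mem_filter] at h
  rcases h with (((h | ⟨f, _, hf⟩) | ⟨f, _, hf⟩) | ⟨_, hk⟩) | ⟨f, _, hf⟩
  · cases h
  · exact (pvName?_some hf).1
  · exact (pvName?_some hf).1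
  · simpa using hk
  · exact (pvName?_some hf).1

-- the ten columns of B's stored row, in closed form
lemma pvColumns (ol dl : List (List (String × Option String))) (ws : List (String × String))
    (al : List (List (String × Option String))) (n : String) :
    (((pvRows ol dl ws al).getD n pvDefaultRow).getD "original_fname" none
        = match pvLast? pvName? n ol with
          | some _ => some n | none => some "")
    ∧ (((pvRows ol dl ws al).getD n pvDefaultRow).getD "original_fvalue" none
        = match pvLast? pvName? n ol with
          | some f => pvFGetD f "fvalue" (some "") | none => some "")
    ∧ (((pvRows ol dl ws al).getD n pvDefaultRow).getD "original_funit" none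
        = match pvLast? pvName? n ol with
          | some f => pvFGetD f "funit" none | none => none)
    ∧ (((pvRows ol dl ws al).getD n pvDefaultRow).getD "dabag_fname" none
        = match pvLast? pvName? n dl with
          | some _ => some n | none => some "")
    ∧ (((pvRows ol dl ws al).getD n pvDefaultRow).getD "dabag_fvalue" none
        = match pvLast? pvName? n dl with
          | some f => pvFGetD f "fvalue" (some "") | none => some "")
    ∧ (((pvRows ol dl ws al).getD n pvDefaultRow).getD "dabag_funit" none
        = match pvLast? pvName? n dl with
          | some f => pvFGetD f "funit" none | none => none)
    ∧ (((pvRows ol dl ws al).getD n pvDefaultRow).getD "web_fname" none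
        = match pvLast? pvGWeb n ws with
          | some kv => some (if kv.2 ≠ "" then n else "") | none => some "")
    ∧ (((pvRows ol dl ws al).getD n pvDefaultRow).getD "web_fvalue" none
        = match pvLast? pvGWeb n ws with
          | some kv => some kv.2 | none => some "")
    ∧ (((pvRows ol dl ws al).getD n pvDefaultRow).getD "ai_fname" none
        = match pvLast? pvName? n al with
          | some _ => some n | none => some "")
    ∧ (((pvRows ol dl ws al).getD n pvDefaultRow).getD "ai_fvalue" none
        = match pvLast? pvName? n al with
          | some f => pvFGetD f "fvalue" (some "") | none => some "") := by
  refine ⟨?_, ?_, ?_, ?_, ?_, ?_, ?_, ?_, ?_, ?_⟩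
  · rw [PySem.Dict.getD_eq_get?_getD, pvRows,
      pvPassUntouched pvName? pvUAi "original_fname" (by intro x m r; simp [pvUAi, PySem.Dict.get?_insert]),
      pvPassUntouched pvGWeb pvUWeb "original_fname" (by intro x m r; simp [pvUWeb, PySem.Dict.get?_insert]),
      pvPassUntouched pvName? pvUDabag "original_fname" (by intro x m r; simp [pvUDabag, PySem.Dict.get?_insert]),
      pvPassTouched pvName? pvUOrig "original_fname" (fun _ m => some m) (by intro x m r; simp [pvUOrig, PySem.Dict.get?_insert])]
    rcases h : pvLast? pvName? n ol with _ | z <;> rfl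
  · rw [PySem.Dict.getD_eq_get?_getD, pvRows,
      pvPassUntouched pvName? pvUAi "original_fvalue" (by intro x m r; simp [pvUAi, PySem.Dict.get?_insert]),
      pvPassUntouched pvGWeb pvUWeb "original_fvalue" (by intro x m r; simp [pvUWeb, PySem.Dict.get?_insert]),
      pvPassUntouched pvName? pvUDabag "original_fvalue" (by intro x m r; simp [pvUDabag, PySem.Dict.get?_insert]),
      pvPassTouched pvName? pvUOrig "original_fvalue" (fun x _ => pvFGetD x "fvalue" (some "")) (by intro x m r; simp [pvUOrig, PySem.Dict.get?_insert])]
    rcases h : pvLast? pvName? n ol with _ | z <;> rfl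
  · rw [PySem.Dict.getD_eq_get?_getD, pvRows,
      pvPassUntouched pvName? pvUAi "original_funit" (by intro x m r; simp [pvUAi, PySem.Dict.get?_insert]),
      pvPassUntouched pvGWeb pvUWeb "original_funit" (by intro x m r; simp [pvUWeb, PySem.Dict.get?_insert]),
      pvPassUntouched pvName? pvUDabag "original_funit" (by intro x m r; simp [pvUDabag, PySem.Dict.get?_insert]),
      pvPassTouched pvName? pvUOrig "original_funit" (fun x _ => pvFGetD x "funit" none) (by intro x m r; simp [pvUOrig, PySem.Dict.get?_insert])]
    rcases h : pvLast? pvName? n ol with _ | z <;> rfl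
  · rw [PySem.Dict.getD_eq_get?_getD, pvRows,
      pvPassUntouched pvName? pvUAi "dabag_fname" (by intro x m r; simp [pvUAi, PySem.Dict.get?_insert]),
      pvPassUntouched pvGWeb pvUWeb "dabag_fname" (by intro x m r; simp [pvUWeb, PySem.Dict.get?_insert]),
      pvPassTouched pvName? pvUDabag "dabag_fname" (fun _ m => some m) (by intro x m r; simp [pvUDabag, PySem.Dict.get?_insert]),
      pvPassUntouched pvName? pvUOrig "dabag_fname" (by intro x m r; simp [pvUOrig, PySem.Dict.get?_insert])]
    rcases h : pvLast? pvName? n dl with _ | z <;> rfl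
  · rw [PySem.Dict.getD_eq_get?_getD, pvRows,
      pvPassUntouched pvName? pvUAi "dabag_fvalue" (by intro x m r; simp [pvUAi, PySem.Dict.get?_insert]),
      pvPassUntouched pvGWeb pvUWeb "dabag_fvalue" (by intro x m r; simp [pvUWeb, PySem.Dict.get?_insert]),
      pvPassTouched pvName? pvUDabag "dabag_fvalue" (fun x _ => pvFGetD x "fvalue" (some "")) (by intro x m r; simp [pvUDabag, PySem.Dict.get?_insert]),
      pvPassUntouched pvName? pvUOrig "dabag_fvalue" (by intro x m r; simp [pvUOrig, PySem.Dict.get?_insert])]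
    rcases h : pvLast? pvName? n dl with _ | z <;> rfl
  · rw [PySem.Dict.getD_eq_get?_getD, pvRows,
      pvPassUntouched pvName? pvUAi "dabag_funit" (by intro x m r; simp [pvUAi, PySem.Dict.get?_insert]),
      pvPassUntouched pvGWeb pvUWeb "dabag_funit" (by intro x m r; simp [pvUWeb, PySem.Dict.get?_insert]),
      pvPassTouched pvName? pvUDabag "dabag_funit" (fun x _ => pvFGetD x "funit" none) (by intro x m r; simp [pvUDabag, PySem.Dict.get?_insert]),
      pvPassUntouched pvName? pvUOrig "dabag_funit" (by intro x m r; simp [pvUOrig, PySem.Dict.get?_insert])]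
    rcases h : pvLast? pvName? n dl with _ | z <;> rfl
  · rw [PySem.Dict.getD_eq_get?_getD, pvRows,
      pvPassUntouched pvName? pvUAi "web_fname" (by intro x m r; simp [pvUAi, PySem.Dict.get?_insert]),
      pvPassTouched pvGWeb pvUWeb "web_fname" (fun kv m => some (if kv.2 ≠ "" then m else "")) (by intro x m r; simp [pvUWeb, PySem.Dict.get?_insert]),
      pvPassUntouched pvName? pvUDabag "web_fname" (by intro x m r; simp [pvUDabag, PySem.Dict.get?_insert]),
      pvPassUntouched pvName? pvUOrig "web_fname" (by intro x m r; simp [pvUOrig, PySem.Dict.get?_insert])]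
    rcases h : pvLast? pvGWeb n ws with _ | z <;> rfl
  · rw [PySem.Dict.getD_eq_get?_getD, pvRows,
      pvPassUntouched pvName? pvUAi "web_fvalue" (by intro x m r; simp [pvUAi, PySem.Dict.get?_insert]),
      pvPassTouched pvGWeb pvUWeb "web_fvalue" (fun kv _ => some kv.2) (by intro x m r; simp [pvUWeb, PySem.Dict.get?_insert]),
      pvPassUntouched pvName? pvUDabag "web_fvalue" (by intro x m r; simp [pvUDabag, PySem.Dict.get?_insert]),
      pvPassUntouched pvName? pvUOrig "web_fvalue" (by intro x m r; simp [pvUOrig, PySem.Dict.get?_insert])]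
    rcases h : pvLast? pvGWeb n ws with _ | z <;> rfl
  · rw [PySem.Dict.getD_eq_get?_getD, pvRows,
      pvPassTouched pvName? pvUAi "ai_fname" (fun _ m => some m) (by intro x m r; simp [pvUAi, PySem.Dict.get?_insert]),
      pvPassUntouched pvGWeb pvUWeb "ai_fname" (by intro x m r; simp [pvUWeb, PySem.Dict.get?_insert]),
      pvPassUntouched pvName? pvUDabag "ai_fname" (by intro x m r; simp [pvUDabag, PySem.Dict.get?_insert]),
      pvPassUntouched pvName? pvUOrig "ai_fname" (by intro x m r; simp [pvUOrig, PySem.Dict.get?_insert])]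
    rcases h : pvLast? pvName? n al with _ | z <;> rfl
  · rw [PySem.Dict.getD_eq_get?_getD, pvRows,
      pvPassTouched pvName? pvUAi "ai_fvalue" (fun x _ => pvFGetD x "fvalue" (some "")) (by intro x m r; simp [pvUAi, PySem.Dict.get?_insert]),
      pvPassUntouched pvGWeb pvUWeb "ai_fvalue" (by intro x m r; simp [pvUWeb, PySem.Dict.get?_insert]),
      pvPassUntouched pvName? pvUDabag "ai_fvalue" (by intro x m r; simp [pvUDabag, PySem.Dict.get?_insert]),
      pvPassUntouched pvName? pvUOrig "ai_fvalue" (by intro x m r; simp [pvUOrig, PySem.Dict.get?_insert])]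
    rcases h : pvLast? pvName? n al with _ | z <;> rfl

-- ===== VERDICT (by name: the statement is the Claim_ definition above) =====
theorem align_features_py_spec : Claim_equal_align_features_py := by
  intro ol dl ws al hdom hpre
  unfold Pre_align_features_py at hpre
  unfold Spec_align_features_py
  simp only [align_features_py, align_features_py_alt]
  rw [pvNamesEq ol dl ws al]
  apply List.map_congr_left
  intro n hn
  have hmem := (PySem.List.mem_sorted _ _ _ n).mp hn
  have hne : n ≠ "" := pvNamesNe ol dl ws al n hmem
  obtain ⟨c1, c2, c3, c4, c5, c6, c7, c8, c9, c10⟩ := pvColumns ol dl ws al n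
  have hk := pvRowsKeys ol dl ws al n
  rw [PySem.Dict.items_eq_map_keys _ (by rw [hk]; decide) none, hk]
  rw [show pvDefaultRow.keys = ["original_fname", "original_fvalue", "original_funit",
        "dabag_fname", "dabag_fvalue", "dabag_funit", "web_fname", "web_fvalue",
        "ai_fname", "ai_fvalue"] from rfl]
  simp only [List.map_cons, List.map_nil]
  simp only [c1, c2, c3, c4, c5, c6, c7, c8, c9, c10]
  simp only [PySem.Dict.getD_eq_get?_getD, pvGetA', pvMkGet_eq_last ws n hne hpre,
    PySem.Dict.get?_empty]
  rcases hLo : pvLast? pvName? n ol with _ | f <;>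
  rcases hLd : pvLast? pvName? n dl with _ | fd <;>
  rcases hLw : pvLast? pvGWeb n ws with _ | kv <;>
  rcases hLa : pvLast? pvName? n al with _ | fa <;>
    simp only [hLo, hLd, hLw, hLa, Option.getD_some, Option.getD_none, Option.map_some,
      Option.map_none] <;>
    (try simp only [if_pos (pvName?_some (pvLast?_sound pvName? n ol f hLo)).2]) <;>
    (try simp only [if_pos (pvName?_some (pvLast?_sound pvName? n dl fd hLd)).2]) <;>
    (try simp only [if_pos (pvName?_some (pvLast?_sound pvName? n al fa hLa)).2]) <;>
    rfl
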